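-- pv_equiv track=rewrite | github.com/silva2kand/C-Users-Silva-python-projects-repo- | legion/legion/agents/review_agent.py | _check_import_issues
-- ===== SOURCE A (Python) =====
-- from typing import Dict, Any, Optional, List
--
-- def _check_import_issues(code: str) -> List[Dict[str, Any]]:
--     """Check for import-related issues"""
--     issues = []
--
--     # Check for unused imports
--     lines = code.split('\n')
--     imports = []
--     import_usage = {}
--
--     for line in lines:
--         if line.strip().startswith('import ') or line.strip().startswith('from '):
--             if 'import' in line:
--                 parts = line.split('import')
--                 if len(parts) > 1:
--                     module = parts[1].strip().split('.')[0].split(' as ')[0]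
--                     imports.append(module)
--         elif line.strip() and not line.strip().startswith('#'):
--             # Check usage in code
--             for imp in imports:
--                 if imp in line and imp not in import_usage:
--                     import_usage[imp] = True
--
--     unused_imports = [imp for imp in imports if imp not in import_usage]
--     for unused in unused_imports:
--         issues.append({
--             "type": "import_issue",
--             "severity": "medium",
--             "line": "unknown",
--             "message": f"Unused import: {unused}",
--             "suggestion": "Remove unused import or use it in the code"
--         })
--
--     return issues
-- ===== SOURCE B (Python) =====
-- from typing import Dict, Any, List
--
-- def _module_name(line: str) -> str:
--     return line.split('import')[1].strip().split('.')[0].split(' as ')[0]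
--
-- def _check_import_issues(code: str) -> List[Dict[str, Any]]:
--     """Check for import-related issues (two-phase: classify lines, then resolve usage)."""
--     lines = code.split('\n')
--     imports = []          # every import occurrence, in order
--     first_decl = {}       # module name -> index of its first import line
--     code_lines = []       # (index, line) of usage-relevant lines
--     for idx, line in enumerate(lines):
--         stripped = line.strip()
--         if stripped.startswith('import ') or stripped.startswith('from '):
--             if 'import' in line:
--                 parts = line.split('import')
--                 if len(parts) > 1:
--                     module = _module_name(line)
--                     imports.append(module)
--                     if module not in first_decl:
--                         first_decl[module] = idx
--         elif stripped and not stripped.startswith('#'):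
--             code_lines.append((idx, line))
--     used = set()
--     for module, decl in first_decl.items():
--         if any(idx > decl and module in line for idx, line in code_lines):
--             used.add(module)
--     return [
--         {
--             "type": "import_issue",
--             "severity": "medium",
--             "line": "unknown",
--             "message": f"Unused import: {m}",
--             "suggestion": "Remove unused import or use it in the code",
--         }
--         for m in imports if m not in used
--     ]
-- ===== Notes on version B (the rewrite author's own statement) =====
-- stated objective: alternative
-- what changed: Single stateful scan interleaving import collection with a per-code-line inner loop over all imports seen so far is replaced by a two-phase decomposition: one pass classifies lines (first-declaration index per module, list of indexed code lines), then usage is resolved per module by one scan over the collected code lines after its first declaration.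
import Mathlib
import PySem

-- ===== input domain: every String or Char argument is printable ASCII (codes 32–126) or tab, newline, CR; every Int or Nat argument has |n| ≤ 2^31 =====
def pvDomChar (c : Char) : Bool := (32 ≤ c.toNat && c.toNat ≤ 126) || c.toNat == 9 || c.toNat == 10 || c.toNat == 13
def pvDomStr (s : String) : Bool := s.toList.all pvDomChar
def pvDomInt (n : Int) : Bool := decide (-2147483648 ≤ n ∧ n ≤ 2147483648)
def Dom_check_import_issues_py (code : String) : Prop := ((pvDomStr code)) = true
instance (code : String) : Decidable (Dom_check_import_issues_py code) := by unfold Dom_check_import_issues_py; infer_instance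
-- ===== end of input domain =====

-- B replaces A's single stateful scan (inner usage loop over the imports seen so far at each
-- code line) by a two-phase decomposition: classify the lines first (first-declaration index
-- per module + indexed code lines), then resolve usage per module; same return value.

-- shared helper: both Pythons compute 'line.split('import')[1].strip().split('.')[0].split(' as ')[0]'
def pvParts (line : String) : List String := (PySem.Str.split? line "import").getD []

def pvModule (line : String) : String :=
  (((PySem.Str.split?
      (((PySem.Str.split? (PySem.Str.strip ((pvParts line).getD 1 "")) ".").getD []).getD 0 "")
      " as ").getD []).getD 0 "")

-- shared helper: the issue dict literal both Pythons build
def pvIssue (unused : String) : List (String × String) :=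
  [("type", "import_issue"), ("severity", "medium"), ("line", "unknown"),
   ("message", "Unused import: " ++ unused),
   ("suggestion", "Remove unused import or use it in the code")]

-- ===== PORT A =====
-- inner loop body: 'for imp in imports: if imp in line and imp not in import_usage: import_usage[imp] = True'
def pvStepUsage (line : String) (u : PySem.Dict String Bool) (imp : String) : PySem.Dict String Bool :=
  if PySem.Str.isIn imp line && !u.contains imp then u.insert imp true else u

def pvStepA (st : List String × PySem.Dict String Bool) (line : String) :
    List String × PySem.Dict String Bool :=
  if PySem.Str.startswith (PySem.Str.strip line) "import " ||
     PySem.Str.startswith (PySem.Str.strip line) "from " then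
    if PySem.Str.isIn "import" line then
      if (pvParts line).length > 1 then
        (st.1 ++ [pvModule line], st.2)
      else st
    else st
  else if !(PySem.Str.strip line == "") && !PySem.Str.startswith (PySem.Str.strip line) "#" then
    (st.1, st.1.foldl (pvStepUsage line) st.2)
  else st

def check_import_issues_py (code : String) : List (List (String × String)) :=
  let lines := (PySem.Str.split? code "\n").getD []
  let r := lines.foldl pvStepA ([], PySem.Dict.empty)
  (r.1.filter (fun imp => !r.2.contains imp)).map pvIssue

-- ===== PORT B =====
-- first phase: classify each (idx, line): import occurrence / first declaration / code line
def pvStepB (st : List String × PySem.Dict String Int × List (Int × String)) (p : Int × String) :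
    List String × PySem.Dict String Int × List (Int × String) :=
  let stripped := PySem.Str.strip p.2
  if PySem.Str.startswith stripped "import " || PySem.Str.startswith stripped "from " then
    if PySem.Str.isIn "import" p.2 then
      if (pvParts p.2).length > 1 then
        let m := pvModule p.2
        (st.1 ++ [m], (if st.2.1.contains m then st.2.1 else st.2.1.insert m p.1), st.2.2)
      else st
    else st
  else if !(stripped == "") && !PySem.Str.startswith stripped "#" then
    (st.1, st.2.1, st.2.2 ++ [p])
  else st

def check_import_issues_py_alt (code : String) : List (List (String × String)) :=
  let lines := (PySem.Str.split? code "\n").getD []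
  let st := (PySem.List.enumerate lines 0).foldl pvStepB ([], PySem.Dict.empty, [])
  -- second phase: a module is used iff some code line after its first declaration mentions it
  let used : PySem.Set String :=
    st.2.1.items.foldl
      (fun s p =>
        if st.2.2.any (fun q => decide (p.2 < q.1) && PySem.Str.isIn p.1 q.2) then PySem.Set.add s p.1
        else s)
      PySem.Set.empty
  (st.1.filter (fun m => !PySem.Set.contains used m)).map pvIssue

-- ===== PRECONDITION & SPEC =====
def Spec_check_import_issues_py (code : String) (out : List (List (String × String))) : Prop := out = check_import_issues_py_alt code
instance (code : String) (out : List (List (String × String))) : Decidable (Spec_check_import_issues_py code out) := by unfold Spec_check_import_issues_py; infer_instance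

-- ===== CLAIM (what is proved, stated in full; the proofs are below) =====
def Claim_equal_check_import_issues_py : Prop := ∀ (code : String), Dom_check_import_issues_py code → Spec_check_import_issues_py code (check_import_issues_py code)

-- ===== LEMMAS AND PROOFS =====

-- line classification (proof-side views of the shared branch conditions)
def pvImportish (l : String) : Bool :=
  PySem.Str.startswith (PySem.Str.strip l) "import " ||
  PySem.Str.startswith (PySem.Str.strip l) "from "

def pvIsCode (l : String) : Bool :=
  !pvImportish l && !(PySem.Str.strip l == "") && !PySem.Str.startswith (PySem.Str.strip l) "#"

def pvImpLine (l : String) : Option String :=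
  if pvImportish l then
    if PySem.Str.isIn "import" l && decide ((pvParts l).length > 1) then
      some (pvModule l)
    else none
  else none

-- 'used' predicate of A's scan, as a recursion over the remaining lines given the imports so far
def pvUp (m : String) : List String → List String → Bool
  | [], _ => false
  | l :: ls, imps =>
    match pvImpLine l with
    | some m' => pvUp m ls (imps ++ [m'])
    | none =>
      if pvIsCode l then
        (PySem.Str.isIn m l && decide (m ∈ imps)) || pvUp m ls imps
      else pvUp m ls imps

-- B's classification, as recursions over the lines with a running index
def pvFd (m : String) : List String → Int → Option Int
  | [], _ => none
  | l :: ls, i =>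
    match pvImpLine l with
    | some m' => if m' = m then some i else pvFd m ls (i + 1)
    | none => pvFd m ls (i + 1)

def pvCls : List String → Int → List (Int × String)
  | [], _ => []
  | l :: ls, i => (if pvIsCode l then [(i, l)] else []) ++ pvCls ls (i + 1)

theorem pvImpLine_not_code {l : String} {m' : String} (h : pvImpLine l = some m') :
    pvIsCode l = false := by
  rw [pvImpLine] at h; rw [pvIsCode]
  by_cases hi : pvImportish l = true <;> simp_all

theorem pvStepA_eq (st : List String × PySem.Dict String Bool) (l : String) :
    pvStepA st l =
      match pvImpLine l with
      | some m => (st.1 ++ [m], st.2)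
      | none =>
        if pvIsCode l then (st.1, st.1.foldl (pvStepUsage l) st.2) else st := by
  unfold pvStepA pvImpLine pvIsCode pvImportish
  repeat' split
  all_goals try simp_all
  all_goals (exfalso; omega)

theorem pvStepB_eq (st : List String × PySem.Dict String Int × List (Int × String)) (p : Int × String) :
    pvStepB st p =
      match pvImpLine p.2 with
      | some m =>
        (st.1 ++ [m], (if st.2.1.contains m then st.2.1 else st.2.1.insert m p.1), st.2.2)
      | none =>
        if pvIsCode p.2 then (st.1, st.2.1, st.2.2 ++ [p]) else st := by
  unfold pvStepB pvImpLine pvIsCode pvImportish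
  repeat' split
  all_goals try simp_all
  all_goals (exfalso; omega)

-- A's inner usage loop over one code line, as a key-set update
theorem usage_line (l : String) (m : String) :
    ∀ (imps : List String) (u : PySem.Dict String Bool),
      (imps.foldl (pvStepUsage l) u).contains m =
        (u.contains m || (decide (m ∈ imps) && PySem.Str.isIn m l)) := by
  intro imps
  induction imps with
  | nil => intro u; simp
  | cons imp rest ih =>
    intro u
    simp only [List.foldl_cons, ih, pvStepUsage]
    by_cases he : imp = m
    · subst he
      by_cases hin : PySem.Chars.isIn imp.toList l.toList = true <;>
        by_cases hc : u.contains imp = true <;>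
          simp_all [PySem.Dict.contains_insert]
    · have he' : (m = imp) = False := eq_false (fun h => he h.symm)
      have hb : (m == imp) = false := beq_eq_false_iff_ne.mpr (fun h => he h.symm)
      by_cases hin : PySem.Chars.isIn imp.toList l.toList = true <;>
        by_cases hc : u.contains imp = true <;>
          simp [PySem.Dict.contains_insert, hb, he', hin, hc]

-- A's whole scan: first component collects the imports; usage keys are pvUp
theorem A_fold (m : String) :
    ∀ (ls : List String) (imps : List String) (u : PySem.Dict String Bool),
      (ls.foldl pvStepA (imps, u)).1 = imps ++ ls.filterMap pvImpLine ∧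
      (ls.foldl pvStepA (imps, u)).2.contains m = (u.contains m || pvUp m ls imps) := by
  intro ls
  induction ls with
  | nil => intro imps u; simp [pvUp]
  | cons l ls ih =>
    intro imps u
    simp only [List.foldl_cons, pvStepA_eq]
    cases h : pvImpLine l with
    | some m' =>
      rcases ih (imps ++ [m']) u with ⟨h1, h2⟩
      exact ⟨by simp [h1, List.filterMap_cons, h],
             by simp [h2, pvUp, h]⟩
    | none =>
      by_cases hc : pvIsCode l = true
      · rcases ih imps (imps.foldl (pvStepUsage l) u) with ⟨h1, h2⟩
        refine ⟨by simp [h1, List.filterMap_cons, h, hc], ?_⟩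
        simp [h2, usage_line, pvUp, h, hc, Bool.or_assoc, Bool.and_comm]
      · rcases ih imps u with ⟨h1, h2⟩
        exact ⟨by simp [h1, List.filterMap_cons, h, hc],
               by simp [h2, pvUp, h, hc]⟩

-- B's first phase
theorem B_fold (m : String) :
    ∀ (ls : List String) (i : Int) (imps : List String) (fd : PySem.Dict String Int)
      (cls : List (Int × String)),
      fd.keys.Nodup →
      ((PySem.List.enumerate ls i).foldl pvStepB (imps, fd, cls)).1 = imps ++ ls.filterMap pvImpLine ∧
      ((PySem.List.enumerate ls i).foldl pvStepB (imps, fd, cls)).2.1.get? m =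
        ((fd.get? m).or (pvFd m ls i)) ∧
      ((PySem.List.enumerate ls i).foldl pvStepB (imps, fd, cls)).2.2 = cls ++ pvCls ls i ∧
      ((PySem.List.enumerate ls i).foldl pvStepB (imps, fd, cls)).2.1.keys.Nodup := by
  intro ls
  induction ls with
  | nil => intro i imps fd cls hnd; simp [PySem.List.enumerate_nil, pvFd, pvCls, hnd]
  | cons l ls ih =>
    intro i imps fd cls hnd
    rw [PySem.List.enumerate_cons]
    simp only [List.foldl_cons, pvStepB_eq]
    cases h : pvImpLine l with
    | some m' =>
      have hnc : pvIsCode l = false := pvImpLine_not_code h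
      by_cases hcon : fd.contains m' = true
      · rcases ih (i + 1) (imps ++ [m']) fd cls hnd with ⟨h1, h2, h3, h4⟩
        refine ⟨by simp [h1, List.filterMap_cons, h, hcon], ?_, by simp [h3, pvCls, h, hcon, hnc], by simp [hcon, h4]⟩
        by_cases he : m' = m
        · subst he
          have : ∃ v, fd.get? m' = some v := by
            rcases PySem.Dict.get?_eq_none_iff_contains (d := fd) (k := m') with hiff
            cases hv : fd.get? m' with
            | none => rw [hiff.mp hv] at hcon; exact absurd hcon (by simp)
            | some v => exact ⟨v, rfl⟩
          rcases this with ⟨v, hv⟩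
          simp [hcon, h2, pvFd, h, hv, Option.some_or, Option.none_or]
        · simp [hcon, h2, pvFd, h, he]
      · rcases ih (i + 1) (imps ++ [m']) (fd.insert m' i) cls
          (by rw [PySem.Dict.keys_insert_of_not_contains fd i (by simp_all)]
              exact List.Nodup.append hnd (List.nodup_singleton m')
                (by intro a ha hb; simp at hb; subst hb
                    exact absurd ((PySem.Dict.contains_iff_mem_keys fd a).mpr ha) (by simp_all)))
          with ⟨h1, h2, h3, h4⟩
        refine ⟨by simp [h1, List.filterMap_cons, h, hcon], ?_, by simp [h3, pvCls, h, hcon, hnc], by simp [hcon, h4]⟩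
        by_cases he : m' = m
        · subst he
          have hn : fd.get? m' = none :=
            (PySem.Dict.get?_eq_none_iff_contains (d := fd) (k := m')).mpr (by simp_all)
          simp [hcon, h2, pvFd, h, hn, PySem.Dict.get?_insert_self, Option.some_or,
            Option.none_or]
        · have hins : (fd.insert m' i).get? m = fd.get? m :=
            PySem.Dict.get?_insert_of_ne fd i (fun hmm => he hmm.symm)
          simp [hcon, h2, pvFd, h, he, hins]
    | none =>
      by_cases hc : pvIsCode l = true
      · rcases ih (i + 1) imps fd (cls ++ [(i, l)]) hnd with ⟨h1, h2, h3, h4⟩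
        exact ⟨by simp [h1, List.filterMap_cons, h, hc],
               by simp [h2, pvFd, h, hc],
               by simp [h3, pvCls, h, hc],
               by simp [h4, hc]⟩
      · rcases ih (i + 1) imps fd cls hnd with ⟨h1, h2, h3, h4⟩
        exact ⟨by simp [h1, List.filterMap_cons, h, hc],
               by simp [h2, pvFd, h, hc],
               by simp [h3, pvCls, h, hc],
               by simp [h4, hc]⟩

theorem pvFd_ge (m : String) :
    ∀ (ls : List String) (i d : Int), pvFd m ls i = some d → i ≤ d := by
  intro ls
  induction ls with
  | nil => intro i d h; simp [pvFd] at h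
  | cons l ls ih =>
    intro i d h
    rw [pvFd] at h
    cases hi : pvImpLine l with
    | some m' =>
      rw [hi] at h
      by_cases he : m' = m
      · simp [he] at h; omega
      · simp [he] at h; have := ih (i + 1) d h; omega
    | none => rw [hi] at h; have := ih (i + 1) d h; omega

theorem pvCls_ge : ∀ (ls : List String) (i : Int) (p : Int × String), p ∈ pvCls ls i → i ≤ p.1 := by
  intro ls
  induction ls with
  | nil => intro i p h; simp [pvCls] at h
  | cons l ls ih =>
    intro i p h
    rw [pvCls] at h
    rcases List.mem_append.mp h with h | h
    · by_cases hc : pvIsCode l = true <;> simp [hc] at h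
      subst h; omega
    · have := ih (i + 1) p h; omega

theorem mem_filterMap_iff_fd (m : String) :
    ∀ (ls : List String) (i : Int), m ∈ ls.filterMap pvImpLine ↔ (pvFd m ls i).isSome := by
  intro ls
  induction ls with
  | nil => intro i; simp [pvFd]
  | cons l ls ih =>
    intro i
    rw [pvFd]
    cases h : pvImpLine l with
    | some m' =>
      by_cases he : m' = m
      · subst he; simp [List.filterMap_cons, h]
      · simp [List.filterMap_cons, h, he, ih (i + 1), Ne.symm he]
    | none => simp [List.filterMap_cons, h, ih (i + 1)]

-- the crux: A's prefix-based usage equals B's first-declaration-index usage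
theorem crux (m : String) :
    ∀ (ls : List String) (i : Int) (imps : List String),
      pvUp m ls imps =
        (if m ∈ imps then (pvCls ls i).any (fun q => PySem.Str.isIn m q.2)
         else match pvFd m ls i with
           | some d => (pvCls ls i).any (fun q => decide (d < q.1) && PySem.Str.isIn m q.2)
           | none => false) := by
  intro ls
  induction ls with
  | nil => intro i imps; simp [pvUp, pvFd, pvCls]
  | cons l ls ih =>
    intro i imps
    rw [pvUp, pvFd, pvCls]
    cases h : pvImpLine l with
    | some m' =>
      have hnc : pvIsCode l = false := pvImpLine_not_code h
      by_cases hm : m ∈ imps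
      · have hm' : m ∈ imps ++ [m'] := List.mem_append_left _ hm
        simp [h, hnc, hm, hm', ih (i + 1) (imps ++ [m'])]
      · by_cases he : m' = m
        · subst he
          have hm' : m' ∈ imps ++ [m'] := List.mem_append_right _ (by simp)
          simp only [h, ih (i + 1) (imps ++ [m']), if_pos hm', if_neg hm]
          simp only [hnc, Bool.false_eq_true, if_false, List.nil_append]
          simp only [if_true]
          rw [Bool.eq_iff_iff, List.any_eq_true, List.any_eq_true]
          constructor
          · rintro ⟨q, hq, hin⟩
            have := pvCls_ge ls (i + 1) q hq
            refine ⟨q, hq, ?_⟩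
            simp only [show i < q.1 by omega, decide_true, Bool.true_and]
            simpa using hin
          · rintro ⟨q, hq, hin⟩
            exact ⟨q, hq, (Bool.and_eq_true_iff.mp hin).2⟩
        · have hm' : m ∉ imps ++ [m'] := by
            intro hcon
            rcases List.mem_append.mp hcon with hc | hc
            · exact hm hc
            · simp at hc; exact he hc.symm
          simp [h, hnc, hm, hm', he, ih (i + 1) (imps ++ [m'])]
    | none =>
      by_cases hc : pvIsCode l = true
      · by_cases hm : m ∈ imps
        · simp [h, hc, hm, ih (i + 1) imps]
        · simp only [h, ih (i + 1) imps, if_neg hm]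
          cases hfd : pvFd m ls (i + 1) with
          | some d =>
            have hd : i + 1 ≤ d := pvFd_ge m ls (i + 1) d hfd
            simp [hc, hm, hfd, show ¬ d < i from by omega]
          | none => simp [hc, hm, hfd]
      · have hnc : pvIsCode l = false := by simp_all
        by_cases hm : m ∈ imps
        · simp [h, hnc, hm, ih (i + 1) imps]
        · simp [h, hnc, hm, ih (i + 1) imps]

-- membership in B's 'used' set
theorem mem_used_foldl (cond : String × Int → Bool) (m : String) :
    ∀ (items : List (String × Int)) (s : PySem.Set String),
      (m ∈ items.foldl (fun s p => if cond p then PySem.Set.add s p.1 else s) s) ↔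
        (m ∈ s ∨ ∃ p ∈ items, p.1 = m ∧ cond p = true) := by
  intro items
  induction items with
  | nil => intro s; simp
  | cons p rest ih =>
    intro s
    simp only [List.foldl_cons]
    by_cases hcp : cond p = true
    · rw [if_pos hcp, ih]
      simp [PySem.Set.mem_add, hcp]
      tauto
    · rw [if_neg hcp, ih]
      constructor
      · rintro (hs | ⟨q, hq, h1, h2⟩)
        · exact Or.inl hs
        · exact Or.inr ⟨q, List.mem_cons_of_mem _ hq, h1, h2⟩
      · rintro (hs | ⟨q, hq, h1, h2⟩)
        · exact Or.inl hs
        · rcases List.mem_cons.mp hq with rfl | hq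
          · exact absurd h2 hcp
          · exact Or.inr ⟨q, hq, h1, h2⟩

-- ===== VERDICT (by name: the statement is the Claim_ definition above) =====
theorem check_import_issues_py_spec : Claim_equal_check_import_issues_py := by
  unfold Claim_equal_check_import_issues_py
  intro code _dom
  unfold Spec_check_import_issues_py
  simp only [check_import_issues_py, check_import_issues_py_alt]
  set ls := (PySem.Str.split? code "\n").getD [] with hls
  obtain ⟨hA1, -⟩ := A_fold "" ls [] PySem.Dict.empty
  obtain ⟨hB1, -, hB3, hB4⟩ := B_fold "" ls 0 [] PySem.Dict.empty [] (by simp)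
  simp only [List.nil_append] at hA1 hB1 hB3
  simp only [hA1, hB1, hB3]
  refine congrArg (List.map pvIssue) ?_
  apply List.filter_congr
  intro x hx
  obtain ⟨-, hA2⟩ := A_fold x ls [] PySem.Dict.empty
  obtain ⟨-, hB2, -, -⟩ := B_fold x ls 0 [] PySem.Dict.empty [] (by simp)
  simp only [PySem.Dict.get?_empty, Option.none_or] at hB2
  have hA2' : (List.foldl pvStepA ([], PySem.Dict.empty) ls).2.contains x = pvUp x ls [] := by
    rw [hA2]; simp
  obtain ⟨d, hd⟩ : ∃ d, pvFd x ls 0 = some d := by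
    have hsome := (mem_filterMap_iff_fd x ls 0).mp hx
    cases hfd : pvFd x ls 0 with
    | none => rw [hfd] at hsome; simp at hsome
    | some d => exact ⟨d, rfl⟩
  have hup : pvUp x ls [] =
      (pvCls ls 0).any (fun q => decide (d < q.1) && PySem.Str.isIn x q.2) := by
    rw [crux x ls 0 [], if_neg (by simp), hd]
  have hcont : (List.foldl pvStepA ([], PySem.Dict.empty) ls).2.contains x =
      PySem.Set.contains
        ((List.foldl pvStepB ([], PySem.Dict.empty, []) (PySem.List.enumerate ls 0)).2.1.items.foldl
          (fun s p =>
            if (pvCls ls 0).any (fun q => decide (p.2 < q.1) && PySem.Str.isIn p.1 q.2) then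
              PySem.Set.add s p.1
            else s)
          PySem.Set.empty) x := by
    rw [hA2', hup, Bool.eq_iff_iff, PySem.Set.contains_iff, mem_used_foldl]
    constructor
    · intro hany
      refine Or.inr ⟨(x, d), PySem.Dict.mem_items_of_get?_eq_some _ ?_, rfl, hany⟩
      rw [hB2, hd]
    · rintro (hs | ⟨p, hp, hpx, hcond⟩)
      · simp [PySem.Set.empty] at hs
      · obtain ⟨p1, p2⟩ := p
        dsimp at hpx hcond
        have hget : (List.foldl pvStepB ([], PySem.Dict.empty, [])
            (PySem.List.enumerate ls 0)).2.1.get? p1 = some p2 :=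
          PySem.Dict.get?_of_mem_items _ hp hB4
        rw [hpx, hB2, hd] at hget
        injection hget with hpd
        rw [hpx, ← hpd] at hcond
        exact hcond
  rw [hcont]
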